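-- pv_equiv track=rewrite | github.com/jbkim0526/Problem_Solving | 프로그래머스/Level3/4. 표현 가능한 이진트리/sol.py | solution
-- ===== SOURCE A (Python) =====
-- def isValid(s, isZero):
--     if len(s) == 1:
--         if not isZero:
--             return True
--         else:
--             return s != "1"
--     n = len(s)//2 ; mid = s[n]
--     if isZero and mid == "1":
--         return False
--     if mid == "0":
--         return isValid(s[:n],True) and isValid(s[n+1:],True)
--     else:
--         return isValid(s[:n],isZero) and isValid(s[n+1:],isZero)
--
-- def solution(numbers):
--     answer = []
--     tree_sizes = [1,3,7,15,31,63]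
--     for num in numbers:
--         s = ""; temp = bin(num);  n = len(temp)-2
--         for tree_size in tree_sizes:
--             if tree_size >= n:
--                 s = "0"*(tree_size-n)+temp[2:]
--                 break
--         if isValid(s,False):
--             answer.append(1)
--         else:
--             answer.append(0)
--     return answer
-- ===== SOURCE B (Python) =====
-- def ancestors_ok(s, i):
--     # walk the root-to-node binary-search path over index intervals;
--     # fail iff a strict ancestor of position i holds '0'
--     lo, hi = 0, len(s)
--     while True:
--         mid = (lo + hi) // 2
--         if mid == i:
--             return True
--         if s[mid] == '0':
--             return False
--         if i < mid:
--             hi = mid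
--         else:
--             lo = mid + 1
--
-- def solution(numbers):
--     answer = []
--     for num in numbers:
--         temp = bin(num); n = len(temp) - 2
--         size = next((t for t in (1, 3, 7, 15, 31, 63) if t >= n), None)
--         s = "" if size is None else "0" * (size - n) + temp[2:]
--         valid = all(s[i] != '1' or ancestors_ok(s, i) for i in range(len(s)))
--         answer.append(1 if valid else 0)
--     return answer
-- ===== Notes on version B (the rewrite author's own statement) =====
-- stated objective: alternative
-- what changed: The recursive isValid with a propagated isZero flag over substrings is replaced by a flag-free per-position check: a position fails only if it holds '1' and some strict ancestor on its root-to-node binary-search path holds '0', checked by an iterative interval walk over indices (no substrings, no recursion, no stack).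
import Mathlib
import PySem

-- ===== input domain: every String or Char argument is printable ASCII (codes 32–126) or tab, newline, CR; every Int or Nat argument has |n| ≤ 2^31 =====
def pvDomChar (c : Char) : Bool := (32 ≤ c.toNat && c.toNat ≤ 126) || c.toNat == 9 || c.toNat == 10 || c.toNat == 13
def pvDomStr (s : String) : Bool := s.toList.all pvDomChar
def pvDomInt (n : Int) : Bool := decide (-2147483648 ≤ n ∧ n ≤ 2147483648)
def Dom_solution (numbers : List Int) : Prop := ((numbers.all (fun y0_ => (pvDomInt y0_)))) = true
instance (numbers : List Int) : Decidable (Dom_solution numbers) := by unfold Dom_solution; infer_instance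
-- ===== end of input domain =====

-- B replaces A's recursive isValid (isZero flag over substrings) by a flag-free per-position
-- check: '1' at position i is allowed iff no strict ancestor on i's root-to-node path is '0'
-- (objective: alternative decomposition, same cost).

-- Shared model of Python's built-in bin(num): '0b<bits>' / '-0b<bits>' (exact for every int).
-- The fuel argument only makes the halving recursion structural; fuel = m always suffices.
def pyBinBitsAux (fuel : Nat) (m : Nat) : List Char :=
  match fuel with
  | 0 => []
  | f + 1 => if m = 0 then [] else pyBinBitsAux f (m / 2) ++ [if m % 2 = 1 then '1' else '0']

def pyBinBits (m : Nat) : List Char := pyBinBitsAux m m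

def pyBin (num : Int) : List Char :=
  if num < 0 then '-' :: '0' :: 'b' :: pyBinBits num.natAbs
  else if num = 0 then ['0', 'b', '0']
  else '0' :: 'b' :: pyBinBits num.toNat

-- ===== PORT A =====
-- A's recursive isValid; the s.length = 0 guard marks where Python raises IndexError on s[n]
-- (reachable only for |num| ≥ 2^63, outside Dom; the value returned there is irrelevant to the
-- claim).  The fuel argument only makes the recursion structural; fuel = s.length always
-- suffices (each recursive call strictly shortens s), so the fuel-0 branch is never reached
-- from isValidA.
def isValidAAux (fuel : Nat) (s : List Char) (isZero : Bool) : Bool :=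
  match fuel with
  | 0 => false
  | f + 1 =>
    if s.length = 1 then
      if !isZero then true else !(s == ['1'])
    else if s.length = 0 then false  -- Python: IndexError on s[n]
    else
      let n := s.length / 2
      let mid := (PySem.List.pyGet? s (n : Int)).getD ' '  -- in range since n < s.length
      if isZero && mid == '1' then false
      else if mid == '0' then isValidAAux f (s.take n) true && isValidAAux f (s.drop (n + 1)) true
      else isValidAAux f (s.take n) isZero && isValidAAux f (s.drop (n + 1)) isZero

def isValidA (s : List Char) (isZero : Bool) : Bool := isValidAAux s.length s isZero

-- the inner padding loop of A's solution: first tree_size ≥ n wins, else s stays ""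
def padA (sizes : List Nat) (n : Nat) (temp : List Char) : List Char :=
  match sizes with
  | [] => []
  | t :: rest => if t ≥ n then List.replicate (t - n) '0' ++ temp.drop 2 else padA rest n temp

def solution (numbers : List Int) : List Int :=
  numbers.foldl (fun answer num =>
    let temp := pyBin num
    let n := temp.length - 2
    let s := padA [1, 3, 7, 15, 31, 63] n temp
    if isValidA s false then answer ++ [(1 : Int)] else answer ++ [(0 : Int)]) []

-- ===== PORT B =====
-- B's ancestors_ok while loop: an interval walk from the root interval [lo, hi) down to
-- position i, failing on the first strict ancestor that holds '0'.  The fuel argument only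
-- makes the loop structural: the interval shrinks every iteration, so fuel = hi - lo (here
-- s.length) always suffices while i lies inside the interval.
def climbAux (fuel : Nat) (s : List Char) (i lo hi : Nat) : Bool :=
  match fuel with
  | 0 => true
  | f + 1 =>
    let mid := (lo + hi) / 2
    if mid = i then true
    else if (PySem.List.pyGet? s (mid : Int)).getD ' ' == '0' then false
    else if i < mid then climbAux f s i lo mid
    else climbAux f s i (mid + 1) hi

def ancestorsOk (s : List Char) (i : Nat) : Bool := climbAux s.length s i 0 s.length

def solution_alt (numbers : List Int) : List Int :=
  numbers.foldl (fun answer num =>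
    let temp := pyBin num
    let n := temp.length - 2
    let size? := ([1, 3, 7, 15, 31, 63] : List Nat).find? (fun t => n ≤ t)
    let s := match size? with
      | none => []
      | some t => List.replicate (t - n) '0' ++ temp.drop 2
    let valid := (List.range s.length).all
      (fun i => !((PySem.List.pyGet? s (i : Int)).getD ' ' == '1') || ancestorsOk s i)
    answer ++ [if valid then (1 : Int) else 0]) []

-- ===== PRECONDITION & SPEC =====
def Spec_solution (numbers : List Int) (out : List Int) : Prop := out = solution_alt numbers
instance (numbers : List Int) (out : List Int) : Decidable (Spec_solution numbers out) := by unfold Spec_solution; infer_instance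

-- ===== CLAIM (what is proved, stated in full; the proofs are below) =====
def Claim_equal_solution : Prop := ∀ (numbers : List Int), Dom_solution numbers → Spec_solution numbers (solution numbers)

-- ===== LEMMAS AND PROOFS =====

-- any sufficient fuel computes the same value as fuel = s.length
theorem isValidAAux_irrel (f1 : Nat) : ∀ (f2 : Nat) (s : List Char) (z : Bool),
    s.length ≤ f1 → s.length ≤ f2 → isValidAAux f1 s z = isValidAAux f2 s z := by
  induction f1 with
  | zero =>
    intro f2 s z h1 _
    have hs : s = [] := List.eq_nil_of_length_eq_zero (Nat.le_zero.mp h1)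
    subst hs
    cases f2 <;> simp [isValidAAux]
  | succ f ih =>
    intro f2 s z h1 h2
    match f2, s with
    | 0, s =>
      have hs : s = [] := List.eq_nil_of_length_eq_zero (Nat.le_zero.mp h2)
      subst hs; simp [isValidAAux]
    | g + 1, s =>
      rw [isValidAAux, isValidAAux]
      by_cases hl1 : s.length = 1
      · simp [hl1]
      · by_cases hl0 : s.length = 0
        · simp [hl0]
        · simp only [hl1, hl0, if_false]
          have hlen : 2 ≤ s.length := by omega
          have htake : (s.take (s.length / 2)).length ≤ f := by
            simp [List.length_take]; omega
          have htake' : (s.take (s.length / 2)).length ≤ g := by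
            simp [List.length_take]; omega
          have hdrop : (s.drop (s.length / 2 + 1)).length ≤ f := by
            simp [List.length_drop]; omega
          have hdrop' : (s.drop (s.length / 2 + 1)).length ≤ g := by
            simp [List.length_drop]; omega
          rw [ih g _ true htake htake', ih g _ true hdrop hdrop',
              ih g _ z htake htake', ih g _ z hdrop hdrop']

theorem isValidA_one (s : List Char) (z : Bool) (h : s.length = 1) :
    isValidA s z = (!z || !(s == ['1'])) := by
  rw [isValidA, h, isValidAAux, if_pos h]; cases z <;> simp

theorem isValidA_big (s : List Char) (z : Bool) (h1 : ¬s.length = 1) (h0 : ¬s.length = 0) :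
    isValidA s z =
      (let n := s.length / 2
       let mid := (PySem.List.pyGet? s (n : Int)).getD ' '
       if z && mid == '1' then false
       else if mid == '0' then isValidA (s.take n) true && isValidA (s.drop (n + 1)) true
       else isValidA (s.take n) z && isValidA (s.drop (n + 1)) z) := by
  have hlen : 2 ≤ s.length := by omega
  obtain ⟨k, hk⟩ : ∃ k, s.length = k + 1 := ⟨s.length - 1, by omega⟩
  rw [isValidA, hk, isValidAAux, ← hk]
  simp only [h1, h0, if_false]
  have htake : (s.take (s.length / 2)).length ≤ k := by simp [List.length_take]; omega
  have hdrop : (s.drop (s.length / 2 + 1)).length ≤ k := by simp [List.length_drop]; omega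
  rw [isValidAAux_irrel k _ _ true htake le_rfl, isValidAAux_irrel k _ _ true hdrop le_rfl,
      isValidAAux_irrel k _ _ z htake le_rfl, isValidAAux_irrel k _ _ z hdrop le_rfl]
  rfl

-- the in-range character of s, as both ports read it
def chr (s : List Char) (i : Nat) : Char := (PySem.List.pyGet? s (i : Int)).getD ' '

def extract (s : List Char) (lo hi : Nat) : List Char := (s.drop lo).take (hi - lo)

theorem climbAux_irrel (f1 : Nat) : ∀ (f2 : Nat) (s : List Char) (i lo hi : Nat),
    lo ≤ i → i < hi → hi - lo ≤ f1 → hi - lo ≤ f2 →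
    climbAux f1 s i lo hi = climbAux f2 s i lo hi := by
  induction f1 with
  | zero => intro f2 s i lo hi h1 h2 h3 _; omega
  | succ f ih =>
    intro f2 s i lo hi h1 h2 h3 h4
    match f2 with
    | 0 => omega
    | g + 1 =>
      rw [climbAux, climbAux]
      split_ifs with hm hc hlt
      · rfl
      · rfl
      · exact ih g s i lo ((lo + hi) / 2) h1 hlt (by omega) (by omega)
      · exact ih g s i ((lo + hi) / 2 + 1) hi (by omega) h2 (by omega) (by omega)

theorem all_congr_mem {α : Type} {l : List α} {p q : α → Bool}
    (h : ∀ a ∈ l, p a = q a) : l.all p = l.all q := by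
  induction l with
  | nil => rfl
  | cons x xs ih =>
    simp only [List.all_cons]
    rw [h x (by simp), ih (fun a ha => h a (by simp [ha]))]

theorem chr_eq (s : List Char) (i : Nat) (h : i < s.length) : chr s i = s[i] := by
  simp [chr, List.getElem?_eq_getElem h]

theorem extract_length (s : List Char) (lo hi : Nat) (h : hi ≤ s.length) :
    (extract s lo hi).length = hi - lo := by
  simp [extract]; omega

theorem chr_extract (s : List Char) (lo hi j : Nat) (hj : j < hi - lo) (h : hi ≤ s.length) :
    chr (extract s lo hi) j = chr s (lo + j) := by
  have h1 : j < (extract s lo hi).length := by rw [extract_length s lo hi h]; omega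
  have h2 : lo + j < s.length := by omega
  rw [chr_eq _ _ h1, chr_eq _ _ h2]
  simp [extract]

-- the heart of the equivalence: on a perfect interval, A's flag recursion equals
-- B's per-position ancestor-path test
theorem main_lemma (k : Nat) : ∀ (lo hi : Nat) (s : List Char) (z : Bool),
    hi - lo = 2 ^ (k + 1) - 1 → lo < hi → hi ≤ s.length →
    isValidA (extract s lo hi) z =
      (List.range' lo (hi - lo)).all
        (fun i => !(chr s i == '1') || (!z && climbAux (hi - lo) s i lo hi)) := by
  induction k with
  | zero =>
    intro lo hi s z h hlh hs
    have h1 : hi - lo = 1 := by norm_num at h; exact h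
    have hhi : hi = lo + 1 := by omega
    subst hhi
    have hls : lo < s.length := by omega
    have hlen1 : (extract s lo (lo + 1)).length = 1 := by
      rw [extract_length s lo (lo + 1) hs]; omega
    obtain ⟨c, hc⟩ := List.length_eq_one_iff.mp hlen1
    have hcchr : c = chr s lo := by
      have := chr_extract s lo (lo + 1) 0 (by omega) hs
      rw [hc] at this
      simpa [chr_eq [c] 0 (by simp)] using this
    rw [isValidA_one _ z hlen1, hc]
    have hmid : (lo + (lo + 1)) / 2 = lo := by omega
    have hclimb : climbAux (lo + 1 - lo) s lo lo (lo + 1) = true := by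
      have : lo + 1 - lo = 0 + 1 := by omega
      rw [this, climbAux]
      simp [hmid]
    have hrange : List.range' lo (lo + 1 - lo) = [lo] := by
      have : lo + 1 - lo = 1 := by omega
      rw [this]; rfl
    rw [hrange]
    simp only [List.all_cons, List.all_nil, hclimb, Bool.and_true, ← hcchr]
    have hbeq : ([c] == ['1']) = (c == '1') := by
      cases hq : (c == '1') <;> simp_all
    rw [hbeq]
    cases z <;> cases hq : (c == '1') <;> simp
  | succ k ih =>
    intro lo hi s z h hlh hs
    obtain ⟨m, hm⟩ : ∃ m, 2 ^ (k + 1) - 1 = m := ⟨_, rfl⟩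
    have hm1 : 1 ≤ m := by
      have h2 : 2 ≤ 2 ^ (k + 1) := by
        calc 2 = 2 ^ 1 := by norm_num
        _ ≤ 2 ^ (k + 1) := Nat.pow_le_pow_right (by norm_num) (by omega)
      omega
    have hp2 : 2 ^ (k + 1 + 1) - 1 = 2 * m + 1 := by
      have h2 : 2 ^ (k + 1 + 1) = 2 * 2 ^ (k + 1) := by ring
      omega
    have hhi : hi = lo + (2 * m + 1) := by omega
    subst hhi
    have hT : (extract s lo (lo + (2 * m + 1))).length = 2 * m + 1 := by
      rw [extract_length s lo _ hs]; omega
    have hdiv : (2 * m + 1) / 2 = m := by omega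
    -- A-side: one unfolding, children are the two half intervals
    have htake : (extract s lo (lo + (2 * m + 1))).take m = extract s lo (lo + m) := by
      simp only [extract, List.take_take]
      congr 1
      omega
    have hdrop : (extract s lo (lo + (2 * m + 1))).drop (m + 1) = extract s (lo + m + 1) (lo + (2 * m + 1)) := by
      simp only [extract, List.drop_take, List.drop_drop]
      congr 1
      omega
    have hmidc : chr (extract s lo (lo + (2 * m + 1))) m = chr s (lo + m) :=
      chr_extract s lo _ m (by omega) hs
    have hA : isValidA (extract s lo (lo + (2 * m + 1))) z =
        (if z && (chr s (lo + m) == '1') then false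
         else if chr s (lo + m) == '0' then
           isValidA (extract s lo (lo + m)) true && isValidA (extract s (lo + m + 1) (lo + (2 * m + 1))) true
         else
           isValidA (extract s lo (lo + m)) z && isValidA (extract s (lo + m + 1) (lo + (2 * m + 1))) z) := by
      rw [isValidA_big _ z (by omega) (by omega)]
      simp only [hT, hdiv, htake, hdrop]
      rw [show ((PySem.List.pyGet? (extract s lo (lo + (2 * m + 1))) ((m : Nat) : Int)).getD ' ') = chr s (lo + m) from hmidc]
    -- IH on the two halves
    have ihl : ∀ z' : Bool, isValidA (extract s lo (lo + m)) z' =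
        (List.range' lo m).all (fun i => !(chr s i == '1') || (!z' && climbAux m s i lo (lo + m))) := by
      intro z'
      have := ih lo (lo + m) s z' (by omega) (by omega) (by omega)
      simpa [show lo + m - lo = m from by omega] using this
    have ihr : ∀ z' : Bool, isValidA (extract s (lo + m + 1) (lo + (2 * m + 1))) z' =
        (List.range' (lo + m + 1) m).all (fun i => !(chr s i == '1') || (!z' && climbAux m s i (lo + m + 1) (lo + (2 * m + 1)))) := by
      intro z'
      have := ih (lo + m + 1) (lo + (2 * m + 1)) s z' (by omega) (by omega) (by omega)
      simpa [show lo + (2 * m + 1) - (lo + m + 1) = m from by omega] using this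
    -- B-side: split the index range at the root position lo + m
    have hsplit : List.range' lo (lo + (2 * m + 1) - lo) =
        List.range' lo m ++ (lo + m) :: List.range' (lo + m + 1) m := by
      have h2 : lo + (2 * m + 1) - lo = m + (m + 1) := by omega
      have h3 : lo + 1 * m = lo + m := by omega
      rw [h2, ← List.range'_append (s := lo) (m := m) (n := m + 1) (step := 1), h3,
        List.range'_succ]
    have hfuel : lo + (2 * m + 1) - lo = 2 * m + 1 := by omega
    have hmid2 : (lo + (lo + (2 * m + 1))) / 2 = lo + m := by omega
    have hclimbmid : climbAux (lo + (2 * m + 1) - lo) s (lo + m) lo (lo + (2 * m + 1)) = true := by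
      rw [hfuel, show 2 * m + 1 = (2 * m) + 1 from rfl, climbAux]
      simp [hmid2]
    have hclimbl : ∀ i : Nat, lo ≤ i → i < lo + m →
        climbAux (lo + (2 * m + 1) - lo) s i lo (lo + (2 * m + 1)) =
          (if chr s (lo + m) == '0' then false else climbAux m s i lo (lo + m)) := by
      intro i hi1 hi2
      rw [hfuel, show 2 * m + 1 = (2 * m) + 1 from rfl, climbAux]
      simp only [hmid2]
      rw [if_neg (by omega)]
      unfold chr
      split_ifs with hc
      · rfl
      · exact climbAux_irrel (2 * m) m s i lo (lo + m) hi1 hi2 (by omega) (by omega)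
    have hclimbr : ∀ i : Nat, lo + m + 1 ≤ i → i < lo + (2 * m + 1) →
        climbAux (lo + (2 * m + 1) - lo) s i lo (lo + (2 * m + 1)) =
          (if chr s (lo + m) == '0' then false else climbAux m s i (lo + m + 1) (lo + (2 * m + 1))) := by
      intro i hi1 hi2
      rw [hfuel, show 2 * m + 1 = (2 * m) + 1 from rfl, climbAux]
      simp only [hmid2]
      rw [if_neg (by omega)]
      unfold chr
      split_ifs with hc hlt
      · rfl
      · omega
      · exact climbAux_irrel (2 * m) m s i (lo + m + 1) (lo + (2 * m + 1)) hi1 hi2 (by omega) (by omega)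
    -- assemble
    rw [hA, hsplit, List.all_append, List.all_cons]
    rw [all_congr_mem (l := List.range' lo m)
        (q := fun i => !(chr s i == '1') || (!z && (if chr s (lo + m) == '0' then false else climbAux m s i lo (lo + m))))
        (fun a ha => by
          obtain ⟨j, hj, rfl⟩ := List.mem_range'.mp ha
          simp only [hclimbl (lo + 1 * j) (by omega) (by omega)])]
    rw [all_congr_mem (l := List.range' (lo + m + 1) m)
        (q := fun i => !(chr s i == '1') || (!z && (if chr s (lo + m) == '0' then false else climbAux m s i (lo + m + 1) (lo + (2 * m + 1)))))
        (fun a ha => by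
          obtain ⟨j, hj, rfl⟩ := List.mem_range'.mp ha
          simp only [hclimbr (lo + m + 1 + 1 * j) (by omega) (by omega)])]
    rw [hclimbmid]
    by_cases h0c : (chr s (lo + m) == '0') = true
    · have h1c : (chr s (lo + m) == '1') = false := by
        cases hq : (chr s (lo + m) == '1')
        · rfl
        · exfalso
          have e0 : chr s (lo + m) = '0' := by simpa using h0c
          have e1 : chr s (lo + m) = '1' := by simpa using hq
          rw [e0] at e1
          exact absurd e1 (by decide)
      simp only [h0c, h1c, if_true, Bool.and_false, Bool.or_false, Bool.false_and,
        Bool.and_true, Bool.not_false, Bool.true_or, Bool.true_and, if_false,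
        Bool.or_true]
      rw [ihl true, ihr true]
      simp only [Bool.not_true, Bool.false_and, Bool.or_false]
      cases z <;> simp
    · simp only [h0c, if_false]
      cases hz : z
      · simp only [Bool.and_false, Bool.false_and, if_false, Bool.not_false, Bool.true_and, Bool.or_true, Bool.and_true]
        rw [ihl false, ihr false]
        simp only [Bool.not_false, Bool.true_and, Bool.true_and]
        ac_rfl
      · by_cases h1c : (chr s (lo + m) == '1') = true
        · simp [h1c]
        · simp only [h1c, Bool.true_and, if_false, Bool.not_true, Bool.false_and, Bool.or_false]
          rw [ihl true, ihr true]
          simp only [Bool.not_true, Bool.false_and, Bool.or_false]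
          cases hq : (chr s (lo + m) == '1') <;> simp_all

-- on a perfect-length string, A's top-level isValid call equals B's per-position all-check
theorem perfect_eq (kk : Nat) (s : List Char) (hlen : s.length = 2 ^ (kk + 1) - 1) :
    isValidA s false =
      (List.range s.length).all
        (fun i => !((PySem.List.pyGet? s (i : Int)).getD ' ' == '1') || ancestorsOk s i) := by
  have h2 : 2 ≤ 2 ^ (kk + 1) := by
    calc 2 = 2 ^ 1 := by norm_num
    _ ≤ 2 ^ (kk + 1) := Nat.pow_le_pow_right (by norm_num) (by omega)
  have h0 : 0 < s.length := by omega
  have hmain := main_lemma kk 0 s.length s false (by omega) h0 le_rfl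
  rw [show extract s 0 s.length = s from by simp [extract]] at hmain
  rw [show s.length - 0 = s.length from by omega] at hmain
  rw [hmain, List.range_eq_range']
  apply all_congr_mem
  intro a _
  simp [ancestorsOk, chr]

-- length bound for the bits of bin(num)
theorem bits_len_le : ∀ (fuel m j : Nat), m ≤ fuel → m < 2 ^ j → (pyBinBitsAux fuel m).length ≤ j := by
  intro fuel
  induction fuel with
  | zero => intro m j _ _; simp [pyBinBitsAux]
  | succ f ih =>
    intro m j hf hj
    rw [pyBinBitsAux]
    by_cases hm : m = 0
    · simp [hm]
    · rw [if_neg hm]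
      have hj1 : 1 ≤ j := by
        by_contra hc
        have : j = 0 := by omega
        subst this
        simp at hj
        omega
      obtain ⟨j', rfl⟩ : ∃ j', j = j' + 1 := ⟨j - 1, by omega⟩
      have h2 : 2 ^ (j' + 1) = 2 * 2 ^ j' := by ring
      have := ih (m / 2) j' (by omega) (by omega)
      simp [List.length_append]
      omega

theorem bits_len_pos : ∀ (fuel m : Nat), 1 ≤ m → m ≤ fuel → 1 ≤ (pyBinBitsAux fuel m).length := by
  intro fuel m h1 h2
  obtain ⟨f, rfl⟩ : ∃ f, fuel = f + 1 := ⟨fuel - 1, by omega⟩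
  rw [pyBinBitsAux, if_neg (by omega)]
  simp

-- within Dom, bin(num) has between 3 and 35 characters, so 1 ≤ n ≤ 63
theorem pyBin_len_bounds (num : Int) (hb : pvDomInt num = true) :
    3 ≤ (pyBin num).length ∧ (pyBin num).length ≤ 65 := by
  have hbb : -2147483648 ≤ num ∧ num ≤ 2147483648 := by simpa [pvDomInt] using hb
  unfold pyBin
  split_ifs with hneg hz
  · have hle : num.natAbs ≤ 2 ^ 31 := by omega
    have h1 : 1 ≤ num.natAbs := by omega
    have hlt : num.natAbs < 2 ^ 32 := by omega
    have := bits_len_le num.natAbs num.natAbs 32 le_rfl hlt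
    have := bits_len_pos num.natAbs num.natAbs h1 le_rfl
    simp only [List.length_cons, pyBinBits]
    omega
  · simp
  · have h1 : 1 ≤ num.toNat := by omega
    have hlt : num.toNat < 2 ^ 32 := by omega
    have := bits_len_le num.toNat num.toNat 32 le_rfl hlt
    have := bits_len_pos num.toNat num.toNat h1 le_rfl
    simp only [List.length_cons, pyBinBits]
    omega

-- B's first-fitting-size lookup builds the same padded string as A's padding loop
theorem pad_find (n : Nat) (temp : List Char) :
    (match ([1, 3, 7, 15, 31, 63] : List Nat).find? (fun t => n ≤ t) with
      | none => ([] : List Char)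
      | some t => List.replicate (t - n) '0' ++ temp.drop 2)
    = padA [1, 3, 7, 15, 31, 63] n temp := by
  by_cases a1 : n ≤ 1
  · rw [List.find?_cons_of_pos (by simpa using a1)]
    simp [padA, a1]
  · rw [List.find?_cons_of_neg (by simpa using a1)]
    by_cases a3 : n ≤ 3
    · rw [List.find?_cons_of_pos (by simpa using a3)]
      simp [padA, a1, a3]
    · rw [List.find?_cons_of_neg (by simpa using a3)]
      by_cases a7 : n ≤ 7
      · rw [List.find?_cons_of_pos (by simpa using a7)]
        simp [padA, a1, a3, a7]
      · rw [List.find?_cons_of_neg (by simpa using a7)]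
        by_cases a15 : n ≤ 15
        · rw [List.find?_cons_of_pos (by simpa using a15)]
          simp [padA, a1, a3, a7, a15]
        · rw [List.find?_cons_of_neg (by simpa using a15)]
          by_cases a31 : n ≤ 31
          · rw [List.find?_cons_of_pos (by simpa using a31)]
            simp [padA, a1, a3, a7, a15, a31]
          · rw [List.find?_cons_of_neg (by simpa using a31)]
            by_cases a63 : n ≤ 63
            · rw [List.find?_cons_of_pos (by simpa using a63)]
              simp [padA, a1, a3, a7, a15, a31, a63]
            · rw [List.find?_cons_of_neg (by simpa using a63)]
              simp [padA, a1, a3, a7, a15, a31, a63]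

-- for 1 ≤ n ≤ 63 the padded string has one of the perfect lengths 2^(k+1) - 1
theorem padA_perfect (n : Nat) (temp : List Char) (h1 : 1 ≤ n) (h63 : n ≤ 63)
    (hlen : temp.length = n + 2) :
    ∃ kk : Nat, (padA [1, 3, 7, 15, 31, 63] n temp).length = 2 ^ (kk + 1) - 1 := by
  simp only [padA]
  split_ifs with a1 a3 a7 a15 a31
  · exact ⟨0, by simp [hlen]; omega⟩
  · exact ⟨1, by simp [hlen]; omega⟩
  · exact ⟨2, by simp [hlen]; omega⟩
  · exact ⟨3, by simp [hlen]; omega⟩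
  · exact ⟨4, by simp [hlen]; omega⟩
  · exact ⟨5, by simp [hlen]; omega⟩

-- ===== VERDICT (by name: the statement is the Claim_ definition above) =====
theorem solution_spec : Claim_equal_solution := by
  intro numbers hdom
  unfold Spec_solution solution solution_alt
  apply PySem.List.foldl_congr_mem
  intro answer num hmem
  dsimp only
  have hb : pvDomInt num = true := by
    have := List.all_eq_true.mp hdom num hmem
    simpa using this
  obtain ⟨h3, h65⟩ := pyBin_len_bounds num hb
  have hn1 : 1 ≤ (pyBin num).length - 2 := by omega
  have hn63 : (pyBin num).length - 2 ≤ 63 := by omega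
  have htl : (pyBin num).length = ((pyBin num).length - 2) + 2 := by omega
  rw [pad_find ((pyBin num).length - 2) (pyBin num)]
  obtain ⟨kk, hkk⟩ := padA_perfect ((pyBin num).length - 2) (pyBin num) hn1 hn63 htl
  rw [← perfect_eq kk _ hkk]
  by_cases hv : isValidA (padA [1, 3, 7, 15, 31, 63] ((pyBin num).length - 2) (pyBin num)) false <;>
    simp [hv]
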